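-- pv_equiv track=rewrite | github.com/self-supervisor/streamlit-agent | streamlit_agent/summarising.py | separate_conversations
-- ===== SOURCE A (Python) =====
-- def separate_conversations(dialogue):
--     """
--     Separates the conversations based on two consecutive turns by 'Nora'.
--     """
--     conversations = []
--     current_conversation = []
--     prev_speaker = None
--
--     for line in dialogue:
--         speaker = line.split(":")[0]
--         if speaker == "Nora" and prev_speaker == "Nora":
--             # End of a conversation
--             conversations.append(current_conversation)
--             current_conversation = [line]
--         else:
--             current_conversation.append(line)
--
--         prev_speaker = speaker
--
--     # Add the last conversation if it exists
--     if current_conversation: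
--         conversations.append(current_conversation)
--
--     return conversations
-- ===== SOURCE B (Python) =====
-- def separate_conversations(dialogue):
--     """
--     Separates the conversations based on two consecutive turns by 'Nora'.
--     Different decomposition: repeatedly search for the next double-Nora
--     boundary and slice off one whole conversation at a time.
--     """
--     rest = list(dialogue)
--     out = []
--     while rest:
--         i = 1
--         while i < len(rest) and not (
--             rest[i].split(":")[0] == "Nora" and rest[i - 1].split(":")[0] == "Nora"
--         ):
--             i += 1
--         out.append(rest[:i])
--         rest = rest[i:]
--     return out
-- ===== Notes on version B (the rewrite author's own statement) =====
-- stated objective: alternative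
-- what changed: Replaces A's single-pass accumulator (current conversation + previous speaker carried through one loop) by repeated search for the next double-Nora boundary followed by slicing one whole conversation off the front.
import Mathlib
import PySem

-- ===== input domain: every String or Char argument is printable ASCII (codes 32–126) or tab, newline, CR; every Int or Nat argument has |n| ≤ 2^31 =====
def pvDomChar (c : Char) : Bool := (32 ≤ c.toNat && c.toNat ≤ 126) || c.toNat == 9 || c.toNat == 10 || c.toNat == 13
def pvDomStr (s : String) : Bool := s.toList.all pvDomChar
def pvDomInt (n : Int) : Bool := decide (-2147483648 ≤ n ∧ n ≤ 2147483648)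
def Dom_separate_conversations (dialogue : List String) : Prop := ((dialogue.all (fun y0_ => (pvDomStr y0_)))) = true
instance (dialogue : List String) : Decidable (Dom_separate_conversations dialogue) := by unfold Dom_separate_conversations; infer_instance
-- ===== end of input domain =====

-- B re-implements the single-pass accumulator as repeated boundary search + slicing (objective: alternative; same cost).

-- shared helper: line.split(":")[0].  split(":") always returns a nonempty list
-- (split? is some for a nonempty separator), so [0] is its head and the defaults never fire.
def pySpeaker (line : String) : String :=
  ((PySem.Str.split? line ":").getD []).headD ""

-- ===== PORT A =====
-- loop body of A's for-loop, as a named step function over the state (conversations, current_conversation, prev_speaker)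
def aStep (st : List (List String) × List String × Option String) (line : String) :
    List (List String) × List String × Option String :=
  let speaker := pySpeaker line
  if speaker == "Nora" && st.2.2 == some "Nora" then
    (st.1 ++ [st.2.1], [line], some speaker)
  else
    (st.1, st.2.1 ++ [line], some speaker)

def separate_conversations (dialogue : List String) : List (List String) :=
  let st := dialogue.foldl aStep ([], [], none)
  if st.2.1 ≠ [] then st.1 ++ [st.2.1] else st.1

-- ===== PORT B =====
-- inner while loop of Source B: smallest i ≥ start with a double-Nora boundary at i, else len(rest)
def scFind (rest : List String) (i : Nat) : Nat :=
  if _h : i < rest.length then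
    if pySpeaker (PySem.List.pyGetD rest (i : Int) "") == "Nora" &&
       pySpeaker (PySem.List.pyGetD rest ((i : Int) - 1) "") == "Nora" then i
    else scFind rest (i + 1)
  else i
termination_by rest.length - i

-- the port of scGo needs this bound for termination
theorem scFind_ge (rest : List String) (i : Nat) : i ≤ scFind rest i := by
  unfold scFind
  split
  · split
    · exact le_refl _
    · have := scFind_ge rest (i + 1)
      omega
  · exact le_refl _
termination_by rest.length - i

-- outer while loop of Source B
def scGo (rest : List String) : List (List String) :=
  if _h : rest.isEmpty then [] else
    let i := scFind rest 1
    PySem.List.slice rest none (some (i : Int)) ::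
      scGo (PySem.List.slice rest (some (i : Int)) none)
termination_by rest.length
decreasing_by
  have h1 : 1 ≤ scFind rest 1 := scFind_ge rest 1
  have h2 : rest ≠ [] := by simpa [List.isEmpty_iff] using _h
  have h3 : 0 < rest.length := List.length_pos_iff.mpr h2
  rw [PySem.List.slice_from_natCast]
  simp only [List.length_drop]
  omega

def separate_conversations_alt (dialogue : List String) : List (List String) :=
  scGo dialogue

-- ===== PRECONDITION & SPEC =====
def Spec_separate_conversations (dialogue : List String) (out : List (List String)) : Prop := out = separate_conversations_alt dialogue
instance (dialogue : List String) (out : List (List String)) : Decidable (Spec_separate_conversations dialogue out) := by unfold Spec_separate_conversations; infer_instance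

-- ===== CLAIM (what is proved, stated in full; the proofs are below) =====
def Claim_equal_separate_conversations : Prop := ∀ (dialogue : List String), Dom_separate_conversations dialogue → Spec_separate_conversations dialogue (separate_conversations dialogue)

-- ===== LEMMAS AND PROOFS =====

-- common recursive characterisation: grouping with the open conversation `cur` and previous speaker `prev`
def G (cur : List String) (prev : Option String) (ys : List String) : List (List String) :=
  match ys with
  | [] => if cur ≠ [] then [cur] else []
  | y :: ys =>
    let s := pySpeaker y
    if s == "Nora" && prev == some "Nora" then cur :: G [y] (some s) ys
    else G (cur ++ [y]) (some s) ys

-- number of lines of ys before the first boundary, given the previous line p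
def relSpan (p : String) (ys : List String) : Nat :=
  match ys with
  | [] => 0
  | y :: ys =>
    if pySpeaker y == "Nora" && pySpeaker p == "Nora" then 0
    else 1 + relSpan y ys

theorem A_eq_G (ys : List String) : ∀ (convs : List (List String)) (cur : List String) (prev : Option String),
    (let st := ys.foldl aStep (convs, cur, prev)
     if st.2.1 ≠ [] then st.1 ++ [st.2.1] else st.1) = convs ++ G cur prev ys := by
  induction ys with
  | nil =>
    intro convs cur prev
    simp only [List.foldl_nil, G]
    split <;> simp
  | cons y ys ih =>
    intro convs cur prev
    rw [List.foldl_cons]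
    by_cases hc : (pySpeaker y == "Nora" && prev == some "Nora") = true
    · have hstep : aStep (convs, cur, prev) y = (convs ++ [cur], [y], some (pySpeaker y)) := by
        simp only [aStep]
        rw [if_pos hc]
      rw [hstep, ih]
      simp only [G]
      rw [if_pos hc]
      simp
    · have hstep : aStep (convs, cur, prev) y = (convs, cur ++ [y], some (pySpeaker y)) := by
        simp only [aStep]
        rw [if_neg hc]
      rw [hstep, ih]
      simp only [G]
      rw [if_neg hc]

theorem G_none_cons (d : String) (t : List String) :
    G [] none (d :: t) = G [d] (some (pySpeaker d)) t := by
  simp [G]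

theorem G_span (ys : List String) : ∀ (p : String) (cur : List String), cur ≠ [] →
    G cur (some (pySpeaker p)) ys =
      (cur ++ ys.take (relSpan p ys)) :: G [] none (ys.drop (relSpan p ys)) := by
  induction ys with
  | nil =>
    intro p cur hcur
    simp [G, relSpan, hcur]
  | cons y ys ih =>
    intro p cur hcur
    by_cases hb : (pySpeaker y == "Nora" && pySpeaker p == "Nora") = true
    · simp only [G, relSpan]
      rw [if_pos (by simpa using hb), if_pos hb]
      rw [List.take_zero, List.drop_zero, List.append_nil, G_none_cons]
    · simp only [G, relSpan]
      rw [if_neg (by simpa using hb), if_neg hb]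
      rw [ih y (cur ++ [y]) (by simp)]
      rw [Nat.add_comm 1 (relSpan y ys), List.take_succ_cons, List.drop_succ_cons]
      simp

theorem scFind_eq (t : List String) : ∀ (pre : List String) (d : String),
    scFind (pre ++ d :: t) (pre.length + 1) = pre.length + 1 + relSpan d t := by
  induction t with
  | nil =>
    intro pre d
    unfold scFind
    rw [dif_neg (by simp)]
    simp [relSpan]
  | cons y t ih =>
    intro pre d
    unfold scFind
    rw [dif_pos (by simp)]
    have hg1 : PySem.List.pyGetD (pre ++ d :: y :: t) ((pre.length + 1 : Nat) : Int) "" = y := by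
      rw [PySem.List.pyGetD_natCast]
      rw [List.getD_eq_getElem?_getD, List.getElem?_append_right (by omega)]
      simp
    have hg0 : PySem.List.pyGetD (pre ++ d :: y :: t) (((pre.length + 1 : Nat) : Int) - 1) "" = d := by
      have hcast : ((pre.length + 1 : Nat) : Int) - 1 = ((pre.length : Nat) : Int) := by push_cast; ring
      rw [hcast, PySem.List.pyGetD_natCast]
      rw [List.getD_eq_getElem?_getD, List.getElem?_append_right (by omega)]
      simp
    rw [hg1, hg0]
    by_cases hb : (pySpeaker y == "Nora" && pySpeaker d == "Nora") = true
    · rw [if_pos hb]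
      simp only [relSpan]
      rw [if_pos hb]
    · rw [if_neg hb]
      have hre : pre ++ d :: y :: t = (pre ++ [d]) ++ y :: t := by simp
      have hlen : pre.length + 1 + 1 = (pre ++ [d]).length + 1 := by simp
      rw [hre, hlen, ih (pre ++ [d]) y]
      simp only [relSpan]
      rw [if_neg hb]
      simp
      omega

theorem B_eq_G (ds : List String) : scGo ds = G [] none ds := by
  match ds with
  | [] => simp [scGo, G]
  | d :: t =>
    rw [scGo, dif_neg (by simp)]
    have hf : scFind (d :: t) 1 = 1 + relSpan d t := by
      have h := scFind_eq t [] d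
      simpa using h
    simp only [hf]
    rw [PySem.List.slice_to_natCast, PySem.List.slice_from_natCast]
    rw [G_none_cons, G_span t d [d] (by simp)]
    rw [Nat.add_comm 1 (relSpan d t), List.take_succ_cons, List.drop_succ_cons]
    have ih := B_eq_G (t.drop (relSpan d t))
    rw [ih]
    simp
termination_by ds.length
decreasing_by
  simp only [List.length_cons, List.length_drop]
  omega

-- ===== VERDICT (by name: the statement is the Claim_ definition above) =====
theorem separate_conversations_spec : Claim_equal_separate_conversations := by
  intro dialogue _
  unfold Spec_separate_conversations separate_conversations separate_conversations_alt
  rw [B_eq_G]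
  exact A_eq_G dialogue [] [] none
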